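-- pv_equiv track=rewrite | github.com/ghiyo/algorithms | sample/scheduler.py | difference_scheduling
-- ===== SOURCE A (Python) =====
-- import heapq
--
-- def difference_scheduling(jobs, jobs_size):
--     """Returns a scheduling based on weight - length in decreasing order"""
--     schedule = []
--     ordered_schedule = []
--     for i in range(jobs_size):
--         heapq.heappush(
--             schedule, ((jobs[i][0]-jobs[i][1]) * -1, [jobs[i][0] * -1, jobs[i][1]]))
--     while schedule:
--         job = heapq.heappop(schedule)
--         ordered_schedule.append([job[0]*-1, (job[1][0] * -1, job[1][1])])
--     return ordered_schedule
-- ===== SOURCE B (Python) =====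
-- def difference_scheduling(jobs, jobs_size):
--     """Returns a scheduling based on weight - length in decreasing order"""
--     k = max(jobs_size, 0)
--     ordered = sorted(jobs[:k], key=lambda j: (-(j[0] - j[1]), -j[0], j[1]))
--     return [[w - l, (w, l)] for (w, l) in ordered]
-- ===== Notes on version B (the rewrite author's own statement) =====
-- stated objective: idiomatic
-- what changed: Replaces the hand-driven binary heap (heappush the negated keys, then heappop one by one) with a single sorted() call over jobs[:jobs_size] using the composite key (-(w-l), -w, l) and a list comprehension for the output shape.
import Mathlib
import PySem

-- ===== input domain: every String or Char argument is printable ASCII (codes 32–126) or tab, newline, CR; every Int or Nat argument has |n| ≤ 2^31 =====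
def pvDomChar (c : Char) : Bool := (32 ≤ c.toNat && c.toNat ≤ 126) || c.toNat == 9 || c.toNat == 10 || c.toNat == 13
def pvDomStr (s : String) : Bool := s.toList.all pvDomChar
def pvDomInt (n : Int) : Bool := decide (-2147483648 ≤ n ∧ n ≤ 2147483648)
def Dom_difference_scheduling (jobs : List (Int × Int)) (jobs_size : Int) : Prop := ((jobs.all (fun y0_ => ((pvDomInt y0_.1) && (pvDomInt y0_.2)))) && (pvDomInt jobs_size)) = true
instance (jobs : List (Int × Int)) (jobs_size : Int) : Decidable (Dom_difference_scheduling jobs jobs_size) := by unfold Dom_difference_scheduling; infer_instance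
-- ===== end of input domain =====

-- B replaces A's hand-driven binary heap by one sorted() call with a composite key (idiomatic; same O(n log n) cost).

-- ===== PORT A =====
-- A pushes tuples (-(w-l), [-w, l]) onto a heapq heap and pops them all.  heapq has no PySem
-- primitive, so it is ported by hand: Python's tuple/list lexicographic comparison is exactly
-- `<` on `Lex (Int × Lex (Int × Int))`, and heappush/heappop are the documented binary min-heap
-- sift operations on the backing array (exact: a binary heap's pop sequence is determined by
-- the heap invariant, which these sifts maintain just as CPython's do).
abbrev pvK : Type := Lex (Int × Lex (Int × Int))

def pvD0 : pvK := toLex (0, toLex (0, 0))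

def pvGet (l : List pvK) (i : Nat) : pvK := l.getD i pvD0

def pvSwap (l : List pvK) (i j : Nat) : List pvK := (l.set i (pvGet l j)).set j (pvGet l i)

-- bubble the element at `pos` up towards the root while it is smaller than its parent
def pvSiftUp (l : List pvK) (pos : Nat) : List pvK :=
  if h : 0 < pos then
    let p := (pos - 1) / 2
    if pvGet l pos < pvGet l p then pvSiftUp (pvSwap l pos p) p else l
  else l
termination_by pos
decreasing_by omega

def pvPush (l : List pvK) (x : pvK) : List pvK := pvSiftUp (l ++ [x]) l.length

lemma length_pvSwap (l : List pvK) (i j : Nat) : (pvSwap l i j).length = l.length := by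
  simp [pvSwap]

-- bubble the element at `pos` down, swapping with its smaller child while out of order
def pvSiftDown (l : List pvK) (pos : Nat) : List pvK :=
  if h1 : 2 * pos + 1 < l.length then
    let c := if 2 * pos + 2 < l.length ∧ pvGet l (2 * pos + 2) < pvGet l (2 * pos + 1)
             then 2 * pos + 2 else 2 * pos + 1
    have hc : pos < c ∧ c < l.length := by
      constructor <;> (dsimp only [c]; split <;> omega)
    if pvGet l c < pvGet l pos then pvSiftDown (pvSwap l pos c) c else l
  else l
termination_by l.length - pos
decreasing_by
  rw [length_pvSwap]
  exact Nat.sub_lt_sub_left (Nat.lt_trans hc.1 hc.2) hc.1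

-- heappop: replace the root by the last element, then sift it down
def pvPop (l : List pvK) : pvK × List pvK :=
  if l.length ≤ 1 then (l.headD pvD0, [])
  else (l.headD pvD0, pvSiftDown (l.dropLast.set 0 (l.getLastD pvD0)) 0)

-- the while-pop loop (with the heap size as structural fuel: each pop removes one element)
def pvDrainGo : Nat → List pvK → List pvK
  | 0, _ => []
  | _ + 1, [] => []
  | fuel + 1, x :: t => (pvPop (x :: t)).1 :: pvDrainGo fuel (pvPop (x :: t)).2

def pvDrain (l : List pvK) : List pvK := pvDrainGo l.length l

def difference_scheduling (jobs : List (Int × Int)) (jobs_size : Int) : List (Int × (Int × Int)) :=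
  -- for i in range(jobs_size): heappush(schedule, ((jobs[i][0]-jobs[i][1]) * -1, [jobs[i][0] * -1, jobs[i][1]]))
  -- jobs[i] is ported with pyGetD: exact under Pre_ (every index of range(jobs_size) is in range)
  let schedule := (PySem.List.pyRange 0 jobs_size 1).foldl
    (fun sch i =>
      let j := PySem.List.pyGetD jobs i (0, 0)
      pvPush sch (toLex ((j.1 - j.2) * -1, toLex (j.1 * -1, j.2)))) []
  -- while schedule: job = heappop(schedule); ordered_schedule.append([job[0]*-1, (job[1][0] * -1, job[1][1])])
  (pvDrain schedule).map (fun k =>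
    ((ofLex k).1 * -1, ((ofLex (ofLex k).2).1 * -1, (ofLex (ofLex k).2).2)))

-- ===== PORT B =====
def difference_scheduling_alt (jobs : List (Int × Int)) (jobs_size : Int) : List (Int × (Int × Int)) :=
  let k := max jobs_size 0
  -- sorted(jobs[:k], key=lambda j: (-(j[0]-j[1]), -j[0], j[1])); the 3-tuple key is `Lex`
  let ordered := PySem.List.sorted (PySem.List.slice jobs none (some k))
    (fun j => (toLex (-(j.1 - j.2), toLex (-j.1, j.2)) : pvK)) false
  ordered.map (fun j => (j.1 - j.2, (j.1, j.2)))

-- ===== PRECONDITION & SPEC =====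
-- Pre_ excludes exactly the inputs where A raises IndexError: jobs_size larger than len(jobs).
def Pre_difference_scheduling (jobs : List (Int × Int)) (jobs_size : Int) : Prop :=
  jobs_size ≤ (jobs.length : Int)
instance (jobs : List (Int × Int)) (jobs_size : Int) : Decidable (Pre_difference_scheduling jobs jobs_size) := by unfold Pre_difference_scheduling; infer_instance

def pvWitness_difference_scheduling : (List (Int × Int)) × Int := ([(3, 1), (2, 2), (5, 1)], 3)

def Spec_difference_scheduling (jobs : List (Int × Int)) (jobs_size : Int) (out : List (Int × (Int × Int))) : Prop := out = difference_scheduling_alt jobs jobs_size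
instance (jobs : List (Int × Int)) (jobs_size : Int) (out : List (Int × (Int × Int))) : Decidable (Spec_difference_scheduling jobs jobs_size out) := by unfold Spec_difference_scheduling; infer_instance

-- ===== CLAIM (what is proved, stated in full; the proofs are below) =====
def Claim_equal_difference_scheduling : Prop := ∀ (jobs : List (Int × Int)) (jobs_size : Int), Dom_difference_scheduling jobs jobs_size → Pre_difference_scheduling jobs jobs_size → Spec_difference_scheduling jobs jobs_size (difference_scheduling jobs jobs_size)

-- ===== LEMMAS AND PROOFS =====

-- the binary-heap invariant: every non-root element is ≥ its parent
def pvIsHeap (l : List pvK) : Prop :=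
  ∀ i, 0 < i → i < l.length → pvGet l ((i - 1) / 2) ≤ pvGet l i

lemma length_pvSiftDown (l : List pvK) (pos : Nat) : (pvSiftDown l pos).length = l.length := by
  fun_induction pvSiftDown l pos with
  | case1 l pos h1 c hc hlt ih => rw [ih, length_pvSwap]
  | case2 => rfl
  | case3 => rfl

lemma length_pvPop (l : List pvK) (h : l ≠ []) : (pvPop l).2.length + 1 = l.length := by
  have h0 : 0 < l.length := List.length_pos_iff.2 h
  unfold pvPop
  split
  · simpa using by omega
  · simp [length_pvSiftDown]
    omega


lemma pvGet_eq_getElem (l : List pvK) (i : Nat) (h : i < l.length) : pvGet l i = l[i] := by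
  simp [pvGet, List.getD_eq_getElem?_getD, List.getElem?_eq_getElem h]

lemma pvGet_set_self (l : List pvK) (i : Nat) (v : pvK) (h : i < l.length) :
    pvGet (l.set i v) i = v := by
  simp [pvGet, List.getD_eq_getElem?_getD, h]

lemma pvGet_set_ne (l : List pvK) (i j : Nat) (v : pvK) (h : j ≠ i) :
    pvGet (l.set i v) j = pvGet l j := by
  simp [pvGet, List.getD_eq_getElem?_getD, List.getElem?_set_ne (by omega : i ≠ j)]

lemma pvGet_pvSwap_fst (l : List pvK) (i j : Nat) (hi : i < l.length) (hij : i ≠ j) :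
    pvGet (pvSwap l i j) i = pvGet l j := by
  rw [pvSwap, pvGet_set_ne _ _ _ _ hij, pvGet_set_self _ _ _ hi]

lemma pvGet_pvSwap_snd (l : List pvK) (i j : Nat) (hj : j < l.length) :
    pvGet (pvSwap l i j) j = pvGet l i := by
  rw [pvSwap, pvGet_set_self _ _ _ (by simpa using hj)]

lemma pvGet_pvSwap_other (l : List pvK) (i j k : Nat) (hki : k ≠ i) (hkj : k ≠ j) :
    pvGet (pvSwap l i j) k = pvGet l k := by
  rw [pvSwap, pvGet_set_ne _ _ _ _ hkj, pvGet_set_ne _ _ _ _ hki]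

lemma pvSwap_perm (l : List pvK) (i j : Nat) (hi : i < l.length) (hj : j < l.length) :
    (pvSwap l i j).Perm l := by
  by_cases hij : i = j
  · subst hij
    rw [pvSwap, pvGet_eq_getElem _ _ hj, List.set_getElem_self hj, List.set_getElem_self hj]
  · rw [List.perm_iff_count]
    intro a
    rw [pvSwap, pvGet_eq_getElem _ _ hi, pvGet_eq_getElem _ _ hj,
        List.count_set (by simpa using hj), List.count_set hi,
        List.getElem_set_ne (by omega)]
    have h1 : l[i] = a → 1 ≤ l.count a := fun h => List.count_pos_iff.2 (h ▸ l.getElem_mem hi)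
    simp only [beq_iff_eq]
    split_ifs <;> simp_all

lemma pvSiftUp_perm (l : List pvK) (pos : Nat) (h : pos < l.length) :
    (pvSiftUp l pos).Perm l := by
  fun_induction pvSiftUp l pos with
  | case1 l pos h0 p hlt ih =>
    have hp : (pos - 1) / 2 < l.length := by omega
    exact (ih (by simpa [length_pvSwap] using hp)).trans (pvSwap_perm l pos _ h hp)
  | case2 => exact List.Perm.refl _
  | case3 => exact List.Perm.refl _

-- invariant for sifting up: heap everywhere except possibly the edge into `pos`,
-- and the children of `pos` already dominate the parent of `pos`
def pvAUp (l : List pvK) (pos : Nat) : Prop :=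
  (∀ i, 0 < i → i < l.length → i ≠ pos → pvGet l ((i - 1) / 2) ≤ pvGet l i) ∧
  (0 < pos → ∀ j, 0 < j → j < l.length → (j - 1) / 2 = pos → pvGet l ((pos - 1) / 2) ≤ pvGet l j)

lemma pvSiftUp_heap (l : List pvK) (pos : Nat) (hlen : pos < l.length) (h : pvAUp l pos) :
    pvIsHeap (pvSiftUp l pos) := by
  fun_induction pvSiftUp l pos with
  | case1 l pos h0 p hlt ih =>
    have hpdef : p = (pos - 1) / 2 := rfl
    have hp : p < l.length := by omega
    have hpp : p < pos := by omega
    obtain ⟨h1, h2⟩ := h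
    have Sfst : pvGet (pvSwap l pos p) pos = pvGet l p :=
      pvGet_pvSwap_fst l pos p hlen (by omega)
    have Ssnd : pvGet (pvSwap l pos p) p = pvGet l pos := pvGet_pvSwap_snd l pos p hp
    have Soth : ∀ k, k ≠ pos → k ≠ p → pvGet (pvSwap l pos p) k = pvGet l k :=
      fun k hk1 hk2 => pvGet_pvSwap_other l pos p k hk1 hk2
    apply ih (by rw [length_pvSwap]; omega)
    refine ⟨?_, ?_⟩
    · intro i hi0 hilen hip
      rw [length_pvSwap] at hilen
      by_cases hipos : i = pos
      · subst hipos
        rw [(show (i - 1) / 2 = p by omega), Ssnd, Sfst]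
        exact le_of_lt hlt
      · by_cases hpari : (i - 1) / 2 = pos
        · rw [hpari, Sfst, Soth i hipos (by omega)]
          exact h2 h0 i hi0 hilen hpari
        · by_cases hparp : (i - 1) / 2 = p
          · rw [hparp, Ssnd, Soth i hipos hip]
            have := h1 i hi0 hilen hipos
            rw [hparp] at this
            exact le_of_lt (lt_of_lt_of_le hlt this)
          · rw [Soth i hipos hip, Soth _ hpari hparp]
            exact h1 i hi0 hilen hipos
    · intro hp0 j hj0 hjlen hjpar
      rw [length_pvSwap] at hjlen
      rw [Soth _ (by omega) (by omega)]
      have hplepos : pvGet l ((p - 1) / 2) ≤ pvGet l p := h1 p hp0 hp (by omega)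
      by_cases hjpos : j = pos
      · subst hjpos
        rw [Sfst]
        exact hplepos
      · have hjp : j ≠ p := by omega
        rw [Soth j hjpos hjp]
        have hj2 := h1 j hj0 hjlen hjpos
        rw [hjpar] at hj2
        exact le_trans hplepos hj2
  | case2 l pos h0 p hlt =>
    intro i hi0 hilen
    by_cases hip : i = pos
    · subst hip
      rw [(show (i - 1) / 2 = p from rfl)]
      exact le_of_not_gt hlt
    · exact h.1 i hi0 hilen hip
  | case3 l pos h0 =>
    intro i hi0 hilen
    exact h.1 i hi0 hilen (by omega)

lemma pvPush_perm (l : List pvK) (x : pvK) : (pvPush l x).Perm (x :: l) := by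
  exact (pvSiftUp_perm _ _ (by simp)).trans (List.perm_append_singleton x l)

lemma pvPush_heap (l : List pvK) (x : pvK) (h : pvIsHeap l) : pvIsHeap (pvPush l x) := by
  apply pvSiftUp_heap _ _ (by simp)
  constructor
  · intro i hi0 hilen hip
    simp at hilen
    have hil : i < l.length := by omega
    have hpar : (i - 1) / 2 < l.length := by omega
    rw [pvGet, pvGet, List.getD_append _ _ _ _ hpar, List.getD_append _ _ _ _ hil]
    exact h i hi0 hil
  · intro h0 j hj0 hjlen hjpar
    simp at hjlen
    omega

lemma pvSiftDown_perm (l : List pvK) (pos : Nat) : (pvSiftDown l pos).Perm l := by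
  fun_induction pvSiftDown l pos with
  | case1 l pos h1 c hc hlt ih =>
    exact ih.trans (pvSwap_perm l pos c (Nat.lt_trans hc.1 hc.2) hc.2)
  | case2 => exact List.Perm.refl _
  | case3 => exact List.Perm.refl _

-- invariant for sifting down: heap everywhere except possibly the edges out of `pos`,
-- and the parent of `pos` already bounds the children of `pos`
def pvADown (l : List pvK) (pos : Nat) : Prop :=
  (∀ i, 0 < i → i < l.length → (i - 1) / 2 ≠ pos → pvGet l ((i - 1) / 2) ≤ pvGet l i) ∧
  (0 < pos → ∀ j, j < l.length → (j - 1) / 2 = pos → pvGet l ((pos - 1) / 2) ≤ pvGet l j)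

lemma pvSiftDown_heap (l : List pvK) (pos : Nat) (h : pvADown l pos) :
    pvIsHeap (pvSiftDown l pos) := by
  fun_induction pvSiftDown l pos with
  | case1 l pos h1 c hc hlt ih =>
    have hcdef : c = if 2 * pos + 2 < l.length ∧ pvGet l (2 * pos + 2) < pvGet l (2 * pos + 1)
                     then 2 * pos + 2 else 2 * pos + 1 := rfl
    have hcpos : pos < c := by rw [hcdef]; split <;> omega
    have hclen : c < l.length := by rw [hcdef]; split <;> omega
    have hcpar : (c - 1) / 2 = pos := by rw [hcdef]; split <;> omega
    have hcmin : ∀ j, j < l.length → (j - 1) / 2 = pos → 0 < j → pvGet l c ≤ pvGet l j := by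
      intro j hjlen hjpar hj0
      have hj12 : j = 2 * pos + 1 ∨ j = 2 * pos + 2 := by omega
      by_cases hcond : 2 * pos + 2 < l.length ∧ pvGet l (2 * pos + 2) < pvGet l (2 * pos + 1)
      · have hc2 : c = 2 * pos + 2 := by rw [hcdef, if_pos hcond]
        rcases hj12 with rfl | rfl
        · rw [hc2]; exact le_of_lt hcond.2
        · exact le_of_eq (by rw [hc2])
      · have hc1 : c = 2 * pos + 1 := by rw [hcdef, if_neg hcond]
        rcases hj12 with rfl | rfl
        · exact le_of_eq (by rw [hc1])
        · rcases not_and_or.1 hcond with hs | hs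
          · omega
          · rw [hc1]; exact le_of_not_gt hs
    obtain ⟨hA1, hA2⟩ := h
    have Sfst : pvGet (pvSwap l pos c) pos = pvGet l c :=
      pvGet_pvSwap_fst l pos c (by omega) (by omega)
    have Ssnd : pvGet (pvSwap l pos c) c = pvGet l pos := pvGet_pvSwap_snd l pos c hclen
    have Soth : ∀ k, k ≠ pos → k ≠ c → pvGet (pvSwap l pos c) k = pvGet l k :=
      fun k a b => pvGet_pvSwap_other l pos c k a b
    apply ih
    refine ⟨?_, ?_⟩
    · intro i hi0 hilen hipar
      rw [length_pvSwap] at hilen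
      by_cases hic : i = c
      · subst hic
        rw [hcpar, Sfst, Ssnd]
        exact le_of_lt hlt
      · by_cases hipos : i = pos
        · subst hipos
          rw [Soth _ (by omega) hipar, Sfst]
          exact hA2 hi0 c hclen hcpar
        · by_cases hparpos : (i - 1) / 2 = pos
          · rw [hparpos, Sfst, Soth i hipos hic]
            exact hcmin i hilen hparpos hi0
          · rw [Soth i hipos hic, Soth _ hparpos hipar]
            exact hA1 i hi0 hilen hparpos
    · intro hc0 j hjlen hjpar
      rw [length_pvSwap] at hjlen
      rw [hcpar, Sfst]
      have hjc : j ≠ c := by omega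
      have hjpos : j ≠ pos := by omega
      rw [Soth j hjpos hjc]
      have := hA1 j (by omega) hjlen (by omega)
      rwa [hjpar] at this
  | case2 l pos h1 c hc hlt =>
    have hcdef : c = if 2 * pos + 2 < l.length ∧ pvGet l (2 * pos + 2) < pvGet l (2 * pos + 1)
                     then 2 * pos + 2 else 2 * pos + 1 := rfl
    have hcmin : ∀ j, j < l.length → (j - 1) / 2 = pos → 0 < j → pvGet l c ≤ pvGet l j := by
      intro j hjlen hjpar hj0
      have hj12 : j = 2 * pos + 1 ∨ j = 2 * pos + 2 := by omega
      by_cases hcond : 2 * pos + 2 < l.length ∧ pvGet l (2 * pos + 2) < pvGet l (2 * pos + 1)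
      · have hc2 : c = 2 * pos + 2 := by rw [hcdef, if_pos hcond]
        rcases hj12 with rfl | rfl
        · rw [hc2]; exact le_of_lt hcond.2
        · exact le_of_eq (by rw [hc2])
      · have hc1 : c = 2 * pos + 1 := by rw [hcdef, if_neg hcond]
        rcases hj12 with rfl | rfl
        · exact le_of_eq (by rw [hc1])
        · rcases not_and_or.1 hcond with hs | hs
          · omega
          · rw [hc1]; exact le_of_not_gt hs
    intro i hi0 hilen
    by_cases hpari : (i - 1) / 2 = pos
    · rw [hpari]
      exact le_trans (le_of_not_gt hlt) (hcmin i hilen hpari hi0)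
    · exact h.1 i hi0 hilen hpari
  | case3 l pos h1 =>
    intro i hi0 hilen
    exact h.1 i hi0 hilen (by omega)

lemma pvHeap_root_le (l : List pvK) (h : pvIsHeap l) :
    ∀ i, i < l.length → pvGet l 0 ≤ pvGet l i := by
  intro i
  induction i using Nat.strong_induction_on with
  | _ i ih =>
    intro hilen
    rcases Nat.eq_zero_or_pos i with hi | hi
    · subst hi; exact le_refl _
    · exact le_trans (ih ((i - 1) / 2) (by omega) (by omega)) (h i hi hilen)

lemma pvPop_fst (l : List pvK) (h : l ≠ []) : (pvPop l).1 = pvGet l 0 := by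
  match l with
  | x :: t => unfold pvPop; split <;> simp [pvGet]

lemma pvDropLast_concat (l : List pvK) (h : l ≠ []) :
    l.dropLast ++ [l.getLastD pvD0] = l := by
  rw [List.getLastD_eq_getLast?, List.getLast?_eq_some_getLast h]
  exact List.dropLast_concat_getLast h

lemma pvPop_perm (l : List pvK) (h : l ≠ []) : l.Perm ((pvPop l).1 :: (pvPop l).2) := by
  match l with
  | [x] => unfold pvPop; simp
  | x :: y :: u =>
    have hlen : ¬ (x :: y :: u).length ≤ 1 := by simp
    unfold pvPop
    rw [if_neg hlen]
    have hdl : (x :: y :: u).dropLast = x :: (y :: u).dropLast := by simp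
    have hlast : (x :: y :: u).getLastD pvD0 = (y :: u).getLastD pvD0 := by
      simp [List.getLastD_eq_getLast?]
    simp only [hdl, hlast, List.headD_cons, List.set]
    refine List.Perm.trans ?_ ((pvSiftDown_perm ((y :: u).getLastD pvD0 :: (y :: u).dropLast) 0).symm.cons x)
    conv_lhs => rw [show y :: u = (y :: u).dropLast ++ [(y :: u).getLastD pvD0] from
      (pvDropLast_concat _ (by simp)).symm]
    exact (List.perm_append_singleton _ _).cons x

lemma pvPop_heap (l : List pvK) (hh : pvIsHeap l) : pvIsHeap (pvPop l).2 := by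
  match l with
  | [] => intro i h1 h2; simp [pvPop] at h2
  | [x] => intro i h1 h2; simp [pvPop] at h2
  | x :: y :: u =>
    have hlen : ¬ (x :: y :: u).length ≤ 1 := by simp
    unfold pvPop
    rw [if_neg hlen]
    apply pvSiftDown_heap
    have hdlen : (x :: y :: u).dropLast.length + 1 = (x :: y :: u).length := by simp
    have hagree : ∀ k, 0 < k → k < (x :: y :: u).dropLast.length →
        pvGet ((x :: y :: u).dropLast.set 0 ((x :: y :: u).getLastD pvD0)) k =
          pvGet (x :: y :: u) k := by
      intro k hk0 hklen
      rw [pvGet_set_ne _ _ _ _ (by omega)]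
      conv_rhs => rw [← pvDropLast_concat (x :: y :: u) (by simp)]
      rw [pvGet, pvGet, List.getD_append _ _ _ _ hklen]
    constructor
    · intro i hi0 hilen hipar
      simp only [List.length_set] at hilen
      rw [hagree i hi0 hilen, hagree ((i - 1) / 2) (by omega) (by omega)]
      exact hh i hi0 (by omega)
    · intro h0
      omega

lemma pvPop_min (l : List pvK) (hh : pvIsHeap l) (h : l ≠ []) :
    ∀ y ∈ l, (pvPop l).1 ≤ y := by
  intro y hy
  rw [pvPop_fst l h]
  obtain ⟨i, hilen, rfl⟩ := List.mem_iff_getElem.1 hy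
  rw [← pvGet_eq_getElem _ _ hilen]
  exact pvHeap_root_le l hh i hilen

lemma pvDrainGo_spec : ∀ (n : Nat) (l : List pvK), l.length ≤ n → pvIsHeap l →
    (pvDrainGo n l).Perm l ∧ (pvDrainGo n l).Pairwise (· ≤ ·) := by
  intro n
  induction n with
  | zero =>
    intro l hlen _
    rw [List.length_eq_zero_iff.1 (Nat.le_zero.1 hlen)]
    exact ⟨List.Perm.refl _, List.Pairwise.nil⟩
  | succ n ih =>
    intro l hlen hh
    match l with
    | [] => exact ⟨List.Perm.refl _, List.Pairwise.nil⟩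
    | x :: t =>
      rw [pvDrainGo]
      have hne : (x :: t) ≠ [] := by simp
      have hlp := length_pvPop _ hne
      have hrec := ih (pvPop (x :: t)).2 (by simp only [List.length_cons] at hlen hlp; omega) (pvPop_heap _ hh)
      constructor
      · exact (hrec.1.cons _).trans (pvPop_perm _ hne).symm
      · rw [List.pairwise_cons]
        refine ⟨?_, hrec.2⟩
        intro a ha
        have : a ∈ (pvPop (x :: t)).2 := hrec.1.mem_iff.1 ha
        exact pvPop_min _ hh hne a ((pvPop_perm _ hne).mem_iff.2 (List.mem_cons_of_mem _ this))

lemma pvDrain_perm_pairwise (l : List pvK) (hh : pvIsHeap l) :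
    (pvDrain l).Perm l ∧ (pvDrain l).Pairwise (· ≤ ·) :=
  pvDrainGo_spec l.length l (Nat.le_refl _) hh

lemma pvFoldl_push (xs : List pvK) : ∀ (acc : List pvK), pvIsHeap acc →
    pvIsHeap (xs.foldl pvPush acc) ∧ (xs.foldl pvPush acc).Perm (acc ++ xs) := by
  induction xs with
  | nil =>
    intro acc h
    refine ⟨h, by simp⟩
  | cons x xs ih =>
    intro acc h
    have hstep := ih (pvPush acc x) (pvPush_heap _ _ h)
    refine ⟨hstep.1, hstep.2.trans (((pvPush_perm acc x).append_right xs).trans ?_)⟩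
    exact List.perm_middle.symm

-- the first jobs_size entries, as A's indexing loop reads them
lemma pvRange_map_getD (jobs : List (Int × Int)) (jobs_size : Int)
    (hpre : jobs_size ≤ (jobs.length : Int)) :
    (PySem.List.pyRange 0 jobs_size 1).map (fun i => PySem.List.pyGetD jobs i (0, 0)) =
      jobs.take jobs_size.toNat := by
  by_cases hle : jobs_size ≤ 0
  · rw [PySem.List.pyRange_one_eq_nil hle]
    simp [(by omega : jobs_size.toNat = 0)]
  · apply List.ext_getElem
    · rw [List.length_map, PySem.List.length_pyRange_one, List.length_take]
      omega
    · intro k hk1 hk2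
      have hkl : k < jobs.length := by rw [List.length_take] at hk2; omega
      simp only [List.getElem_map]
      rw [PySem.List.getElem_pyRange_one, zero_add, PySem.List.pyGetD_natCast,
          List.getElem_take]
      exact List.getD_eq_getElem _ _ hkl

-- B slices the same prefix
lemma pvSlice_take (jobs : List (Int × Int)) (jobs_size : Int) :
    PySem.List.slice jobs none (some (max jobs_size 0)) = jobs.take jobs_size.toNat := by
  have hmax : max jobs_size 0 = ((jobs_size.toNat : Nat) : Int) := by omega
  rw [hmax, PySem.List.slice_to_natCast]

-- ===== VERDICT (by name: the statement is the Claim_ definition above) =====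
theorem difference_scheduling_spec : Claim_equal_difference_scheduling := by
  intro jobs jobs_size _hdom hpre
  unfold Spec_difference_scheduling difference_scheduling difference_scheduling_alt
  dsimp only
  set keyB : (Int × Int) → pvK := fun j => toLex (-(j.1 - j.2), toLex (-j.1, j.2)) with hkeyB
  rw [pvSlice_take]
  set tk := jobs.take jobs_size.toNat with htk
  have hABpt : ∀ j : Int × Int,
      (toLex ((j.1 - j.2) * -1, toLex (j.1 * -1, j.2)) : pvK) = keyB j := by
    intro j
    rw [hkeyB]
    simp only [toLex_inj, Prod.mk.injEq, and_true]
    constructor <;> ring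
  have hfold : List.foldl
      (fun sch i =>
        pvPush sch
          (toLex
            (((PySem.List.pyGetD jobs i (0, 0)).1 - (PySem.List.pyGetD jobs i (0, 0)).2) * -1,
              toLex ((PySem.List.pyGetD jobs i (0, 0)).1 * -1, (PySem.List.pyGetD jobs i (0, 0)).2))))
      [] (PySem.List.pyRange 0 jobs_size 1) = (tk.map keyB).foldl pvPush [] := by
    have h1 : List.foldl
        (fun sch i =>
          pvPush sch
            (toLex
              (((PySem.List.pyGetD jobs i (0, 0)).1 - (PySem.List.pyGetD jobs i (0, 0)).2) * -1,
                toLex ((PySem.List.pyGetD jobs i (0, 0)).1 * -1, (PySem.List.pyGetD jobs i (0, 0)).2))))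
        [] (PySem.List.pyRange 0 jobs_size 1) =
        ((PySem.List.pyRange 0 jobs_size 1).map (fun i => PySem.List.pyGetD jobs i (0, 0))).foldl
          (fun sch j => pvPush sch (keyB j)) [] := by
      rw [List.foldl_map]
      congr 1
      funext sch i
      rw [hABpt]
    rw [h1, pvRange_map_getD jobs jobs_size hpre, ← htk, List.foldl_map]
  rw [hfold]
  have hheap := pvFoldl_push (tk.map keyB) [] (by intro i h1 h2; simp at h2)
  have hdrain := pvDrain_perm_pairwise ((tk.map keyB).foldl pvPush []) hheap.1
  set S := PySem.List.sorted tk keyB false with hS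
  have hSperm : (S.map keyB).Perm (tk.map keyB) := (PySem.List.sorted_perm tk keyB false).map keyB
  have hSpair : (S.map keyB).Pairwise (· ≤ ·) := by
    rw [List.pairwise_map]
    exact PySem.List.sorted_pairwise tk keyB
  have hEq : pvDrain ((tk.map keyB).foldl pvPush []) = S.map keyB := by
    apply PySem.List.eq_of_perm_of_pairwise_le_of_injective (fun x : pvK => x) (fun a b h => h)
      ((hdrain.1.trans (hheap.2.trans (by simp))).trans hSperm.symm)
      (by simpa using hdrain.2) (by simpa using hSpair)
  rw [hEq, List.map_map]
  apply List.map_congr_left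
  intro j _
  simp only [Function.comp_apply, hkeyB, ofLex_toLex]
  rw [Prod.mk.injEq]
  exact ⟨by ring, by rw [Prod.mk.injEq]; exact ⟨by ring, rfl⟩⟩
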